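-- pv_equiv track=rewrite | github.com/dttuoc99/PasswordGenerator | password-generator.py | apply_mode
-- ===== SOURCE A (Python) =====
-- import itertools
--
-- def generate_all_case_combinations(domain):
--     """
--     Generate all possible combinations of uppercase and lowercase for each character in the domain.
--     """
--     combinations = list(itertools.product(*([char.lower(), char.upper()] if char.isalpha() else [char] for char in domain)))
--     return [''.join(combo) for combo in combinations]
--
-- def apply_mode(results, mode, domain):
--     """
--     Apply mode to the results: either convert all to uppercase, lowercase, or randomly case-mix each string.
--     """
--     if mode == 'uppercase':
--         return [result.upper() for result in results]
--     elif mode == 'lowercase':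
--         return [result.lower() for result in results]
--     elif mode == 'random':
--         # Apply all possible case combinations for the domain
--         case_combinations = generate_all_case_combinations(domain)
--         random_results = []
--         for result in results:
--             for case_variant in case_combinations:
--                 # Replace the domain part of the result with each case variant
--                 random_results.append(result.replace(domain, case_variant, 1))
--         return random_results
--     return results
-- ===== SOURCE B (Python) =====
-- def apply_mode(results, mode, domain):
--     if mode == 'uppercase':
--         return [r.upper() for r in results]
--     if mode == 'lowercase':
--         return [r.lower() for r in results]
--     if mode == 'random':
--         # bitmask enumeration of case variants: first letter = most significant
--         # bit, bit set = uppercase, so the order matches itertools.product.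
--         k = sum(1 for ch in domain if ch.isalpha())
--         variants = []
--         for mask in range(1 << k):
--             j = k
--             out = []
--             for ch in domain:
--                 if ch.isalpha():
--                     j -= 1
--                     out.append(ch.upper() if (mask >> j) & 1 else ch.lower())
--                 else:
--                     out.append(ch)
--             variants.append(''.join(out))
--         return [r.replace(domain, v, 1) for r in results for v in variants]
--     return results
-- ===== Notes on version B (the rewrite author's own statement) =====
-- stated objective: alternative
-- what changed: Replaces the itertools.product construction of all case variants (lists of per-character options folded into tuples, then joined) by direct bitmask enumeration: one integer counter over range(2**k) whose bits decide upper/lower for each letter of domain.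
import Mathlib
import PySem

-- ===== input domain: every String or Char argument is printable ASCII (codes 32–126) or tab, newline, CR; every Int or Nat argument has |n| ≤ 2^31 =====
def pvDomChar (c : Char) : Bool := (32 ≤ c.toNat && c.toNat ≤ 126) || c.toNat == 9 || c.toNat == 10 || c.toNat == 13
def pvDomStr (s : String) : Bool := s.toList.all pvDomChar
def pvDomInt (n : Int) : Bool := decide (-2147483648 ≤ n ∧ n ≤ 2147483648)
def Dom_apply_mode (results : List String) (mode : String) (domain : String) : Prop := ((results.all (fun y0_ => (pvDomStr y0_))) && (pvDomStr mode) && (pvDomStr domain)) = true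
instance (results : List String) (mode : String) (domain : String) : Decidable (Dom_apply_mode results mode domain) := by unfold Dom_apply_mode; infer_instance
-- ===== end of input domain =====

-- B replaces the itertools.product fold that A uses to enumerate case variants by
-- direct bitmask enumeration over range(2^k); same values, no speed claim.

-- shared model of Python's str.replace(old, new, 1) (both Pythons call this built-in)
def pvReplace1 (s old new : String) : String :=
  let cs := s.toList
  let i := PySem.Chars.find cs old.toList
  if i = -1 then s
  else String.ofList (cs.take i.toNat ++ new.toList ++ cs.drop (i.toNat + old.toList.length))

-- ===== PORT A =====
-- per-character options: [char.lower(), char.upper()] if char.isalpha() else [char]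
def pvChoices (c : Char) : List (List Char) :=
  if PySem.Chars.isalpha c then [[PySem.Chars.lowerChar c], [PySem.Chars.upperChar c]] else [[c]]

-- itertools.product(*opts) as the standard left fold; ''.join is the concatenation done by ++
def pvProdStep (acc : List (List Char)) (opts : List (List Char)) : List (List Char) :=
  acc.flatMap (fun pre => opts.map (fun o => pre ++ o))

def generate_all_case_combinations (domain : String) : List String :=
  (((domain.toList.map pvChoices).foldl pvProdStep [[]]).map String.ofList)

def apply_mode (results : List String) (mode : String) (domain : String) : List String :=
  if mode == "uppercase" then results.map PySem.Str.upper
  else if mode == "lowercase" then results.map PySem.Str.lower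
  else if mode == "random" then
    let case_combinations := generate_all_case_combinations domain
    results.foldl (fun acc result =>
      case_combinations.foldl (fun acc2 case_variant =>
        acc2 ++ [pvReplace1 result domain case_variant]) acc) []
  else results

-- ===== PORT B =====
-- scan domain: j counts remaining letters; an alpha char consumes bit (j-1) of mask
-- (Nat.testBit mask j is Python's (mask >> j) & 1 as a Bool)
def pvBuild : List Char → Nat → Nat → List Char
  | [], _, _ => []
  | c :: cs, j, mask =>
    if PySem.Chars.isalpha c then
      (if Nat.testBit mask (j - 1) then PySem.Chars.upperChar c else PySem.Chars.lowerChar c)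
        :: pvBuild cs (j - 1) mask
    else c :: pvBuild cs j mask

def pvVariants (domain : List Char) : List (List Char) :=
  let k := (domain.filter PySem.Chars.isalpha).length
  (List.range (2 ^ k)).map (fun mask => pvBuild domain k mask)

def apply_mode_alt (results : List String) (mode : String) (domain : String) : List String :=
  if mode == "uppercase" then results.map PySem.Str.upper
  else if mode == "lowercase" then results.map PySem.Str.lower
  else if mode == "random" then
    let variants := (pvVariants domain.toList).map String.ofList
    results.flatMap (fun r => variants.map (fun v => pvReplace1 r domain v))
  else results

-- ===== PRECONDITION & SPEC =====
def Spec_apply_mode (results : List String) (mode : String) (domain : String) (out : List String) : Prop := out = apply_mode_alt results mode domain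
instance (results : List String) (mode : String) (domain : String) (out : List String) : Decidable (Spec_apply_mode results mode domain out) := by unfold Spec_apply_mode; infer_instance

-- ===== CLAIM (what is proved, stated in full; the proofs are below) =====
def Claim_equal_apply_mode : Prop := ∀ (results : List String) (mode : String) (domain : String), Dom_apply_mode results mode domain → Spec_apply_mode results mode domain (apply_mode results mode domain)

-- ===== LEMMAS AND PROOFS =====

-- unfold the product fold from an arbitrary accumulator
theorem pvProd_foldl (l : List (List (List Char))) (acc : List (List Char)) :
    l.foldl pvProdStep acc
      = acc.flatMap (fun pre => (l.foldl pvProdStep [[]]).map (pre ++ ·)) := by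
  induction l generalizing acc with
  | nil => simp
  | cons opts l ih =>
    simp only [List.foldl_cons]
    rw [ih (pvProdStep acc opts), ih (pvProdStep [[]] opts)]
    simp [pvProdStep, List.flatMap_assoc, List.flatMap_map, List.map_flatMap, List.map_map, Function.comp_def, List.append_assoc]

theorem pvProd_cons (opts : List (List Char)) (l : List (List (List Char))) :
    (opts :: l).foldl pvProdStep [[]]
      = opts.flatMap (fun o => (l.foldl pvProdStep [[]]).map (o ++ ·)) := by
  simp only [List.foldl_cons]
  rw [pvProd_foldl]
  simp [pvProdStep]

-- pvBuild only looks at bits below j (when j bounds the letter count)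
theorem pvBuild_congr (d : List Char) :
    ∀ (j m m' : Nat), (d.filter PySem.Chars.isalpha).length ≤ j →
    (∀ i, i < j → Nat.testBit m i = Nat.testBit m' i) →
    pvBuild d j m = pvBuild d j m' := by
  induction d with
  | nil => intro j m m' _ _; rfl
  | cons c cs ih =>
    intro j m m' hk hbits
    by_cases ha : PySem.Chars.isalpha c = true
    · have hk' : (cs.filter PySem.Chars.isalpha).length ≤ j - 1 := by
        simp [ha] at hk; omega
      have hj : j - 1 < j := by
        have : 0 < j := by simp [ha] at hk; omega
        omega
      simp only [pvBuild, ha, if_true]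
      rw [hbits _ hj, ih (j-1) m m' hk' (fun i hi => hbits i (by omega))]
    · simp only [pvBuild, if_neg ha]
      have hk' : (cs.filter PySem.Chars.isalpha).length ≤ j := by
        simpa [ha] using hk
      rw [ih j m m' hk' hbits]

theorem pvTestBit_low (k r j : Nat) (hj : j < k) :
    Nat.testBit (2 ^ k + r) j = Nat.testBit r j :=
  Nat.testBit_two_pow_add_gt hj r

theorem pvTestBit_high (k r : Nat) (hr : r < 2 ^ k) :
    Nat.testBit (2 ^ k + r) k = true := by
  rw [Nat.testBit_two_pow_add_eq, Nat.testBit_eq_false_of_lt hr]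
  rfl

theorem pvVariants_def (d : List Char) :
    pvVariants d = (List.range (2 ^ (d.filter PySem.Chars.isalpha).length)).map
      (fun mask => pvBuild d (d.filter PySem.Chars.isalpha).length mask) := rfl

-- main lemma: bitmask enumeration equals the product fold
theorem pvVariants_eq (d : List Char) :
    pvVariants d = (d.map pvChoices).foldl pvProdStep [[]] := by
  induction d with
  | nil => simp [pvVariants, pvBuild]
  | cons c cs ih =>
    by_cases ha : PySem.Chars.isalpha c = true
    · set k := (cs.filter PySem.Chars.isalpha).length with hk
      have hkc : ((c :: cs).filter PySem.Chars.isalpha).length = k + 1 := by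
        simp [ha, hk]
      simp only [List.map_cons]
      rw [pvProd_cons, ← ih]
      simp only [pvChoices, ha, if_true]
      have hsplit : (2 : Nat) ^ (k + 1) = 2 ^ k + 2 ^ k := by ring
      have hlow : ∀ m ∈ List.range (2 ^ k),
          pvBuild (c :: cs) (k + 1) m
            = PySem.Chars.lowerChar c :: pvBuild cs k m := by
        intro m hm
        rw [List.mem_range] at hm
        have hbit : Nat.testBit m k = false := Nat.testBit_eq_false_of_lt hm
        simp [pvBuild, ha, hbit]
      have hhigh : ∀ m ∈ List.range (2 ^ k),
          ((fun mask => pvBuild (c :: cs) (k + 1) mask) ∘ (fun x => 2 ^ k + x)) m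
            = PySem.Chars.upperChar c :: pvBuild cs k m := by
        intro m hm
        rw [List.mem_range] at hm
        have hbit : Nat.testBit (2 ^ k + m) k = true := pvTestBit_high k m hm
        simp only [Function.comp_apply, pvBuild, ha, if_true, Nat.add_sub_cancel, hbit]
        congr 1
        exact pvBuild_congr cs k (2 ^ k + m) m le_rfl
          (fun i hi => pvTestBit_low k m i hi)
      have h1 : pvVariants (c :: cs)
          = (List.range (2 ^ k)).map (fun m => PySem.Chars.lowerChar c :: pvBuild cs k m)
            ++ (List.range (2 ^ k)).map (fun m => PySem.Chars.upperChar c :: pvBuild cs k m) := by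
        rw [pvVariants_def, hkc, hsplit, List.range_add, List.map_append, List.map_map]
        rw [List.map_congr_left hlow, List.map_congr_left hhigh]
      rw [h1, pvVariants_def, ← hk]
      simp [List.flatMap_cons, List.map_map, Function.comp_def]
    · have hkc : ((c :: cs).filter PySem.Chars.isalpha).length
          = (cs.filter PySem.Chars.isalpha).length := by
        simp [ha]
      simp only [List.map_cons]
      rw [pvProd_cons, ← ih]
      simp only [pvChoices, if_neg ha]
      rw [pvVariants_def, pvVariants_def, hkc]
      simp [pvBuild, if_neg ha, List.map_map, Function.comp_def]

-- the inner variant loop appends the mapped variants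
theorem pvInner_eq (vs : List String) (r domain : String) (a : List String) :
    vs.foldl (fun a2 v => a2 ++ [pvReplace1 r domain v]) a
      = a ++ vs.map (fun v => pvReplace1 r domain v) := by
  induction vs generalizing a with
  | nil => simp
  | cons v vt ihv => simp only [List.foldl_cons, List.map_cons]; rw [ihv]; simp

-- A's nested append loop is B's flatMap
theorem pvLoop_eq (results vs : List String) (domain : String) (acc : List String) :
    results.foldl (fun acc r => vs.foldl (fun a2 v => a2 ++ [pvReplace1 r domain v]) acc) acc
      = acc ++ results.flatMap (fun r => vs.map (fun v => pvReplace1 r domain v)) := by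
  induction results generalizing acc with
  | nil => simp
  | cons r rs ih =>
    simp only [List.foldl_cons, List.flatMap_cons]
    rw [pvInner_eq, ih]
    simp

-- ===== VERDICT (by name: the statement is the Claim_ definition above) =====
theorem apply_mode_spec : Claim_equal_apply_mode := by
  intro results mode domain _
  unfold Spec_apply_mode apply_mode apply_mode_alt
  split_ifs with h1 h2 h3
  · rfl
  · rfl
  · rw [pvLoop_eq]
    simp only [List.nil_append, generate_all_case_combinations, ← pvVariants_eq]
  · rfl
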